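-- pv_equiv track=rewrite | github.com/nvog/simple-nmt | batch.py | prepare_masks
-- ===== SOURCE A (Python) =====
-- def prepare_masks(sents, eos_symbol):
--     """
--     Mask tgt padding at end of sentence (necessary so all tgt sentences can be treated as having the same length)
--     :param sents:
--     :param eos_symbol:
--     :return:
--     """
--     sents_by_words = []
--     masks = []
--     num_words = 0
--     for i in range(len(max(sents, key=len))):
--         sents_by_words.append([sent[i] if len(sent) > i else eos_symbol for sent in sents])
--         mask = [(1 if len(sent) > i else 0) for sent in sents]
--         masks.append(mask)
--         num_words += sum(mask)
--     return sents_by_words, masks, num_words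
-- ===== SOURCE B (Python) =====
-- def prepare_masks(sents, eos_symbol):
--     lengths = [len(s) for s in sents]
--     max_len = max(lengths)  # ValueError on empty sents, like A's max(sents, key=len)
--     sents_by_words = []
--     cols = [list(s) for s in sents]
--     for _ in range(max_len):
--         sents_by_words.append([c[0] if c else eos_symbol for c in cols])
--         cols = [c[1:] for c in cols]
--     masks = [[1 if L > i else 0 for L in lengths] for i in range(max_len)]
--     return sents_by_words, masks, sum(lengths)
-- ===== Notes on version B (the rewrite author's own statement) =====
-- stated objective: alternative
-- what changed: B precomputes a lengths list, gets num_words as the closed form sum(lengths) and masks directly from lengths instead of accumulating mask sums inside the loop, and transposes by repeatedly peeling the head column off the sentences rather than per-cell guarded indexing; it trades the index lookups for list slicing/copying.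
import Mathlib
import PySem

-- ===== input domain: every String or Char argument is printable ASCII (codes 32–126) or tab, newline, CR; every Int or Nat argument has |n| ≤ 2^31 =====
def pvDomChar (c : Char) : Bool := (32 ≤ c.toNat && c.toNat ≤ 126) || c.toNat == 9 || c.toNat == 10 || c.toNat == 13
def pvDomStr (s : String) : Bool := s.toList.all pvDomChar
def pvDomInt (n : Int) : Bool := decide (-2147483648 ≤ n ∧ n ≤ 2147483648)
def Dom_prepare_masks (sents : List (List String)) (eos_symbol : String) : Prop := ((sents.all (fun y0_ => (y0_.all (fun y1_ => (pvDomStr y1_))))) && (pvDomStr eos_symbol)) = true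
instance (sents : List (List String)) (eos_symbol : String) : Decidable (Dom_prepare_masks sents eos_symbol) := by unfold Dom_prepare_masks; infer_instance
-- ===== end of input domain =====

-- B computes num_words as the closed form sum of lengths, derives masks from a lengths list
-- and transposes by peeling head columns (objective: alternative); A and B agree on nonempty sents.


-- ===== PORT A =====
def prepare_masks (sents : List (List String)) (eos_symbol : String) : List (List String) × List (List Int) × Int :=
  match PySem.List.max? sents (fun s => s.length) with
  | none => ([], [], 0)   -- Python raises ValueError here (max of empty); excluded by Pre_
  | some m =>
    (List.range m.length).foldl
      (fun (acc : List (List String) × List (List Int) × Int) (i : Nat) =>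
        let row := sents.map (fun sent =>
          if sent.length > i then (PySem.List.pyGet? sent (i : Int)).getD eos_symbol else eos_symbol)
        let mask := sents.map (fun sent => if sent.length > i then (1 : Int) else 0)
        (acc.1 ++ [row], acc.2.1 ++ [mask], acc.2.2 + mask.sum))
      ([], [], 0)

-- ===== PORT B =====
-- the 'for _ in range(max_len): append head column; cols = tails' loop of Source B
def pvTransposeFill (fill : String) : Nat → List (List String) → List (List String)
  | 0, _ => []
  | n + 1, cols => cols.map (fun c => c.headD fill) :: pvTransposeFill fill n (cols.map List.tail)

def prepare_masks_alt (sents : List (List String)) (eos_symbol : String) : List (List String) × List (List Int) × Int :=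
  match PySem.List.max? (sents.map List.length) (fun x => x) with
  | none => ([], [], 0)   -- Python raises ValueError here (max of empty); excluded by Pre_
  | some maxLen =>
    (pvTransposeFill eos_symbol maxLen sents,
     (List.range maxLen).map (fun (i : Nat) => (sents.map List.length).map (fun (L : Nat) => if L > i then (1 : Int) else 0)),
     ((sents.map List.length).map (fun (L : Nat) => (L : Int))).sum)

-- ===== PRECONDITION & SPEC =====
-- Pre_ excludes only the empty list of sentences, on which A raises ValueError (max of empty sequence).
def Pre_prepare_masks (sents : List (List String)) (eos_symbol : String) : Prop := sents ≠ []
instance (sents : List (List String)) (eos_symbol : String) : Decidable (Pre_prepare_masks sents eos_symbol) := by unfold Pre_prepare_masks; infer_instance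
def pvWitness_prepare_masks : List (List String) × String := ([["a", "b"], []], "</s>")

def Spec_prepare_masks (sents : List (List String)) (eos_symbol : String) (out : List (List String) × List (List Int) × Int) : Prop := out = prepare_masks_alt sents eos_symbol
instance (sents : List (List String)) (eos_symbol : String) (out : List (List String) × List (List Int) × Int) : Decidable (Spec_prepare_masks sents eos_symbol out) := by unfold Spec_prepare_masks; infer_instance

-- ===== CLAIM (what is proved, stated in full; the proofs are below) =====
def Claim_equal_prepare_masks : Prop := ∀ (sents : List (List String)) (eos_symbol : String), Dom_prepare_masks sents eos_symbol → Pre_prepare_masks sents eos_symbol → Spec_prepare_masks sents eos_symbol (prepare_masks sents eos_symbol)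

-- ===== LEMMAS AND PROOFS =====

-- the peel-columns transpose read off column by column
theorem pvTransposeFill_eq (fill : String) (n : Nat) (xss : List (List String)) :
    pvTransposeFill fill n xss =
      (List.range n).map (fun i => xss.map (fun s => (s.drop i).headD fill)) := by
  induction n generalizing xss with
  | zero => simp [pvTransposeFill]
  | succ n ih =>
    rw [List.range_succ_eq_map]
    simp only [List.map_cons, List.map_map, pvTransposeFill, ih, List.map_map]
    refine List.cons_eq_cons.mpr ⟨by simp, ?_⟩
    apply List.map_congr_left
    intro i _
    apply List.map_congr_left
    intro s _
    simp [Function.comp, ← List.drop_one, List.drop_drop, Nat.succ_eq_add_one, Nat.add_comm]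

-- one column: head of the dropped suffix = guarded indexing
theorem pv_col_elem (s : List String) (i : Nat) (fill : String) :
    (s.drop i).headD fill =
      (if s.length > i then (PySem.List.pyGet? s (i : Int)).getD fill else fill) := by
  rw [List.headD_eq_head?_getD, List.head?_drop, PySem.List.pyGet?_natCast]
  by_cases h : s.length > i
  · simp [h]
  · simp [List.getElem?_eq_none (by omega : s.length ≤ i), h]

-- the min-sum grows by the mask sum
theorem pv_sum_min_succ (L : List Nat) (n : Nat) :
    (L.map (fun l => ((min l n : Nat) : Int))).sum +
      (L.map (fun l => if l > n then (1 : Int) else 0)).sum =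
      (L.map (fun l => ((min l (n + 1) : Nat) : Int))).sum := by
  induction L with
  | nil => simp
  | cons a t ih =>
    simp only [List.map_cons, List.sum_cons]
    rw [← ih]
    by_cases h : a > n
    · simp [h, Nat.min_def]; split_ifs <;> push_cast <;> omega
    · simp [h, Nat.min_def]; split_ifs <;> push_cast <;> omega

-- A's loop in closed form
theorem pv_foldA (sents : List (List String)) (eos : String) (n : Nat) :
    (List.range n).foldl
      (fun (acc : List (List String) × List (List Int) × Int) (i : Nat) =>
        let row := sents.map (fun sent =>
          if sent.length > i then (PySem.List.pyGet? sent (i : Int)).getD eos else eos)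
        let mask := sents.map (fun sent => if sent.length > i then (1 : Int) else 0)
        (acc.1 ++ [row], acc.2.1 ++ [mask], acc.2.2 + mask.sum))
      ([], [], 0) =
      ((List.range n).map (fun (i : Nat) => sents.map (fun sent =>
          if sent.length > i then (PySem.List.pyGet? sent (i : Int)).getD eos else eos)),
       (List.range n).map (fun (i : Nat) => sents.map (fun sent => if sent.length > i then (1 : Int) else 0)),
       ((sents.map List.length).map (fun l => ((min l n : Nat) : Int))).sum) := by
  induction n with
  | zero => simp [Function.comp_def]
  | succ n ih =>
    rw [List.range_succ, List.foldl_append, ih]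
    simp only [List.foldl_cons, List.foldl_nil, List.map_append, List.map_cons, List.map_nil]
    refine Prod.ext rfl (Prod.ext rfl ?_)
    have h := pv_sum_min_succ (sents.map List.length) n
    simp only [List.map_map] at h
    simpa [Function.comp_def] using h

-- the two maxima coincide: length of the first max-by-length sentence = max of the lengths
theorem pv_max_len (sents : List (List String)) (m : List String) (k : Nat)
    (hA : PySem.List.max? sents (fun s => s.length) = some m)
    (hB : PySem.List.max? (sents.map List.length) (fun x => x) = some k) :
    m.length = k := by
  have hmem : m ∈ sents := PySem.List.max?_mem hA
  have hkmem : k ∈ sents.map List.length := PySem.List.max?_mem hB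
  have h1 : m.length ≤ k :=
    PySem.List.max?_isMax hB _ (List.mem_map_of_mem hmem)
  obtain ⟨s, hs, rfl⟩ := List.mem_map.mp hkmem
  exact Nat.le_antisymm h1 (PySem.List.max?_isMax hA _ hs)

theorem pv_main (sents : List (List String)) (eos : String) (h : sents ≠ []) :
    prepare_masks sents eos = prepare_masks_alt sents eos := by
  obtain ⟨m, hm⟩ : ∃ m, PySem.List.max? sents (fun s => s.length) = some m := by
    cases hx : PySem.List.max? sents (fun s => s.length) with
    | none => exact absurd ((PySem.List.max?_eq_none_iff _ _).mp hx) h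
    | some m => exact ⟨m, rfl⟩
  obtain ⟨k, hk⟩ : ∃ k, PySem.List.max? (sents.map List.length) (fun x => x) = some k := by
    cases hx : PySem.List.max? (sents.map List.length) (fun x => x) with
    | none =>
      exact absurd (List.map_eq_nil_iff.mp ((PySem.List.max?_eq_none_iff _ _).mp hx)) h
    | some k => exact ⟨k, rfl⟩
  have hmk : m.length = k := pv_max_len sents m k hm hk
  have hle : ∀ s ∈ sents, s.length ≤ k := by
    intro s hs
    simpa [hmk] using PySem.List.max?_isMax hm s hs
  unfold prepare_masks prepare_masks_alt
  rw [hm, hk]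
  simp only [pv_foldA, hmk]
  refine Prod.ext ?_ (Prod.ext ?_ ?_)
  · rw [pvTransposeFill_eq]
    apply List.map_congr_left
    intro i _
    apply List.map_congr_left
    intro s _
    exact (pv_col_elem s i eos).symm
  · simp only [List.map_map]
    rfl
  · simp only [List.map_map]
    apply congrArg List.sum
    apply List.map_congr_left
    intro s hs
    simp [Nat.min_eq_left (hle s hs), Function.comp]

-- ===== VERDICT (by name: the statement is the Claim_ definition above) =====
theorem prepare_masks_spec : Claim_equal_prepare_masks := by
  intro sents eos _ hpre
  unfold Spec_prepare_masks
  exact pv_main sents eos hpre
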